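-- pv_equiv track=rewrite | github.com/pladee42/alt-history-reel | editor.py | parse_rich_title
-- ===== SOURCE A (Python) =====
-- from typing import List, Optional, Tuple
--
-- def parse_rich_title(title: str) -> List[Tuple[str, str]]:
--     """
--     Parses title for **emphasis**.
--     Returns list of (text, color) tuples.
--     """
--     parts = []
--     # Split by **
--     segments = title.split('**')
--     for i, segment in enumerate(segments):
--         if not segment: continue
--         # If index is odd, it was inside **, so emphasize
--         color = 'cyan' if i % 2 == 1 else 'white'
--         parts.append((segment, color))
--     return parts
-- ===== SOURCE B (Python) =====
-- def parse_rich_title(title):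
--     """Single-pass cursor scanner: walk the characters, toggling emphasis at
--     each '**' marker, instead of split-then-enumerate."""
--     parts = []
--     cur = []
--     emph = False
--     i = 0
--     n = len(title)
--     while i < n:
--         if title[i] == '*' and i + 1 < n and title[i + 1] == '*':
--             if cur:
--                 parts.append((''.join(cur), 'cyan' if emph else 'white'))
--             cur = []
--             emph = not emph
--             i += 2
--         else:
--             cur.append(title[i])
--             i += 1
--     if cur:
--         parts.append((''.join(cur), 'cyan' if emph else 'white'))
--     return parts
-- ===== Notes on version B (the rewrite author's own statement) =====
-- stated objective: alternative
-- what changed: Replaced split('**') plus an enumerate/parity loop with a single cursor scan over the characters that accumulates the current segment and toggles an emphasis flag at each '**' marker.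
import Mathlib
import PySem

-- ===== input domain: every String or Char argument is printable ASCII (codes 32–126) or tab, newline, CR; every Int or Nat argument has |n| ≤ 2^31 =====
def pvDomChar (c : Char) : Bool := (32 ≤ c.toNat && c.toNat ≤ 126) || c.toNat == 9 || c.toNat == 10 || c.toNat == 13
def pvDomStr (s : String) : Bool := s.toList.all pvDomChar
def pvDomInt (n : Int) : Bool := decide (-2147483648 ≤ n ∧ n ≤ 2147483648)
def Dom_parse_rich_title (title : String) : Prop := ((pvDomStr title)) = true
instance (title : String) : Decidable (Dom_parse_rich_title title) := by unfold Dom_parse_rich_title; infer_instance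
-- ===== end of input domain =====

-- B replaces A's split('**')-then-enumerate pass by a single cursor scan that toggles an
-- emphasis flag at each '**' marker (alternative decomposition, same O(n) cost).


-- ===== PORT A =====
-- title.split('**')  (sep ≠ "", so Chars.splitOn is exact), then the enumerate loop.
def parse_rich_title (title : String) : List (String × String) :=
  let segments : List String := (PySem.Chars.splitOn title.toList ['*', '*']).map String.ofList
  (PySem.List.enumerate segments).foldl
    (fun parts p =>
      if p.2 = "" then parts
      else parts ++ [(p.2, if PySem.Int.mod p.1 2 == 1 then "cyan" else "white")]) []

-- ===== PORT B =====
-- `if cur: parts.append((''.join(cur), 'cyan' if emph else 'white'))` of Source B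
def pvFlush (cur : List Char) (emph : Bool) : List (String × String) :=
  if cur.isEmpty then [] else [(String.ofList cur, if emph then "cyan" else "white")]

-- the while-loop of Source B: one cursor pass over the characters, toggling `emph` at each '**'
-- (`title[i] == '*' and i + 1 < n and title[i + 1] == '*'` is the two-character lookahead)
def pvScan : List Char → List Char → Bool → List (String × String)
  | [], cur, emph => pvFlush cur emph
  | [c], cur, emph => pvFlush (cur ++ [c]) emph
  | c1 :: c2 :: rest, cur, emph =>
    if c1 = '*' ∧ c2 = '*' then pvFlush cur emph ++ pvScan rest [] (!emph)
    else pvScan (c2 :: rest) (cur ++ [c1]) emph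

def parse_rich_title_alt (title : String) : List (String × String) :=
  pvScan title.toList [] false

-- ===== PRECONDITION & SPEC =====
def Spec_parse_rich_title (title : String) (out : List (String × String)) : Prop := out = parse_rich_title_alt title
instance (title : String) (out : List (String × String)) : Decidable (Spec_parse_rich_title title out) := by unfold Spec_parse_rich_title; infer_instance

-- ===== CLAIM (what is proved, stated in full; the proofs are below) =====
def Claim_equal_parse_rich_title : Prop := ∀ (title : String), Dom_parse_rich_title title → Spec_parse_rich_title title (parse_rich_title title)

-- ===== LEMMAS AND PROOFS =====

-- reference splitter: what title.split('**') produces, as a clean structural recursion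
def pvSplit : List Char → List (List Char)
  | [] => [[]]
  | [c] => [[c]]
  | c1 :: c2 :: rest =>
    if c1 = '*' ∧ c2 = '*' then [] :: pvSplit rest
    else (c1 :: (pvSplit (c2 :: rest)).headI) :: (pvSplit (c2 :: rest)).tail

theorem pvSplit_ne_nil (l : List Char) : pvSplit l ≠ [] := by
  fun_induction pvSplit l <;> simp

theorem pvSplit_cons (l : List Char) :
    pvSplit l = (pvSplit l).headI :: (pvSplit l).tail := by
  cases hs : pvSplit l with
  | nil => exact absurd hs (pvSplit_ne_nil l)
  | cons hd tl => simp

-- emit the segments, alternating the emphasis flag, skipping empty segments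
def pvEmit : List (List Char) → Bool → List (String × String)
  | [], _ => []
  | s :: rest, emph =>
    (if s.isEmpty then [] else [(String.ofList s, if emph then "cyan" else "white")]) ++
      pvEmit rest (!emph)

theorem splitOn_go_eq (fuel : Nat) :
    ∀ (l cur : List Char) (acc : List (List Char)), l.length < fuel →
      PySem.Chars.splitOn.go ['*', '*'] fuel l cur acc
        = acc.reverse ++ (cur.reverse ++ (pvSplit l).headI) :: (pvSplit l).tail := by
  induction fuel with
  | zero => intro l cur acc h; omega
  | succ f ih =>
    intro l cur acc h
    match l with
    | [] =>
      rw [PySem.Chars.splitOn.go]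
      simp [pvSplit]
      omega
    | [c] =>
      rw [PySem.Chars.splitOn.go]
      have hpre : List.isPrefixOf ['*', '*'] [c] = false := by
        simp [List.isPrefixOf]
      rw [hpre]
      simp only [Bool.false_eq_true, if_false]
      rw [ih [] (c :: cur) acc (by simp at h ⊢; omega)]
      simp [pvSplit]
    | c1 :: c2 :: rest =>
      rw [PySem.Chars.splitOn.go]
      by_cases hc : c1 = '*' ∧ c2 = '*'
      · obtain ⟨rfl, rfl⟩ := hc
        have hpre : List.isPrefixOf ['*', '*'] ('*' :: '*' :: rest) = true := by
          simp [List.isPrefixOf]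
        rw [hpre]
        simp only [if_true]
        rw [show List.drop (['*', '*'] : List Char).length ('*' :: '*' :: rest) = rest from rfl]
        rw [ih rest [] (cur.reverse :: acc) (by simp at h ⊢; omega)]
        rw [show pvSplit ('*' :: '*' :: rest) = [] :: pvSplit rest by simp [pvSplit]]
        rw [pvSplit_cons rest]
        simp
      · have hpre : List.isPrefixOf ['*', '*'] (c1 :: c2 :: rest) = false := by
          simp [List.isPrefixOf]
          intro h1 h2
          exact absurd ⟨h1.symm, h2.symm⟩ hc
        rw [hpre]
        simp only [Bool.false_eq_true, if_false]
        rw [ih (c2 :: rest) (c1 :: cur) acc (by simp at h ⊢; omega)]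
        rw [show pvSplit (c1 :: c2 :: rest)
              = (c1 :: (pvSplit (c2 :: rest)).headI) :: (pvSplit (c2 :: rest)).tail by
            rw [pvSplit.eq_def]; simp [hc]]
        simp

theorem splitOn_eq (l : List Char) :
    PySem.Chars.splitOn l ['*', '*'] = pvSplit l := by
  unfold PySem.Chars.splitOn
  rw [splitOn_go_eq (l.length + 1) l [] [] (by omega)]
  rw [pvSplit_cons l]
  simp

theorem pvScan_eq (l cur : List Char) (emph : Bool) :
    pvScan l cur emph = pvEmit ((cur ++ (pvSplit l).headI) :: (pvSplit l).tail) emph := by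
  fun_induction pvScan l cur emph with
  | case1 cur emph =>
    simp [pvSplit, pvEmit, pvFlush]
  | case2 c cur emph =>
    simp [pvSplit, pvEmit, pvFlush]
  | case3 c1 c2 rest cur emph hc ih =>
    obtain ⟨rfl, rfl⟩ := hc
    rw [show pvSplit ('*' :: '*' :: rest) = [] :: pvSplit rest by
      rw [pvSplit.eq_def]; simp]
    rw [ih]
    rw [pvSplit_cons rest]
    simp [pvEmit, pvFlush]
  | case4 c1 c2 rest cur emph hc ih =>
    rw [show pvSplit (c1 :: c2 :: rest)
          = (c1 :: (pvSplit (c2 :: rest)).headI) :: (pvSplit (c2 :: rest)).tail by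
        rw [pvSplit.eq_def]; simp [hc]]
    rw [ih]
    simp [pvEmit]

theorem ofList_eq_empty_iff (s : List Char) : String.ofList s = "" ↔ s = [] := by
  constructor
  · intro h
    have h2 : (String.ofList s).toList = ("" : String).toList := by rw [h]
    simpa using h2
  · rintro rfl; rfl

theorem enum_fold_eq (ls : List (List Char)) :
    ∀ (k : Int) (acc : List (String × String)), 0 ≤ k →
      (PySem.List.enumerate (ls.map String.ofList) k).foldl
        (fun parts p =>
          if p.2 = "" then parts
          else parts ++ [(p.2, if PySem.Int.mod p.1 2 == 1 then "cyan" else "white")]) acc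
        = acc ++ pvEmit ls (PySem.Int.mod k 2 == 1) := by
  induction ls with
  | nil => intro k acc hk; simp [pvEmit]
  | cons s rest ih =>
    intro k acc hk
    simp only [List.map, PySem.List.enumerate, List.foldl]
    rw [ih (k + 1) _ (by omega)]
    have hmod : ∀ (m : Int), PySem.Int.mod m 2 = m % 2 := by
      intro m
      show Int.fmod m 2 = m % 2
      rw [Int.fmod_eq_emod]
      simp
    have hpar : (PySem.Int.mod (k + 1) 2 == 1) = !(PySem.Int.mod k 2 == 1) := by
      rw [hmod, hmod]
      rcases Int.emod_two_eq k with h | h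
      · have h1 : (k + 1) % 2 = 1 := by omega
        rw [h, h1]; rfl
      · have h1 : (k + 1) % 2 = 0 := by omega
        rw [h, h1]; rfl
    rw [hpar]
    by_cases hs : s = []
    · subst hs
      simp [pvEmit]
    · have hne : ¬ (String.ofList s = "") := by rw [ofList_eq_empty_iff]; exact hs
      have hie : s.isEmpty = false := by simp [hs]
      simp [pvEmit, hne, hie]

-- ===== VERDICT (by name: the statement is the Claim_ definition above) =====
theorem parse_rich_title_spec : Claim_equal_parse_rich_title := by
  intro title _
  unfold Spec_parse_rich_title parse_rich_title parse_rich_title_alt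
  rw [splitOn_eq, enum_fold_eq _ 0 [] (by omega), pvScan_eq]
  rw [show pvEmit ((([] : List Char) ++ (pvSplit title.toList).headI) :: (pvSplit title.toList).tail)
        = pvEmit ((pvSplit title.toList).headI :: (pvSplit title.toList).tail) by simp]
  rw [← pvSplit_cons]
  rfl
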